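-- pv_equiv track=rewrite | github.com/ylhtjhl/Main1 | Main测试.py | find_turning_points
-- ===== SOURCE A (Python) =====
-- def find_turning_points(path):
--     turning_points = []
--     for i in range(1, len(path)-1):
--         current = path[i]
--         previous = path[i-1]
--         next = path[i+1]
--         if ((current[0]-previous[0]) * (next[1]-current[1]) != (current[1]-previous[1]) * (next[0]-current[0])) or(current[0]-previous[0]) * (next[0]-current[0]) + (current[1]-previous[1]) * (next[1]-current[1]) <0:#or (current[0]-previous[0]) * (next[1]-current[1])==(current[1]-previous[1]) * (next[0]-current[0]) ==0#(3,1) (3,3) (3,1) (3-3)*(1-3) (3-1)*(1-3)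
--             turning_points.append(current)
--
--
--     return turning_points
-- ===== SOURCE B (Python) =====
-- def find_turning_points(path):
--     # Different algorithm: classify each edge by its reduced (gcd-normalized)
--     # direction vector; a point is a turning point exactly when both incident
--     # edges are non-degenerate and their direction classes differ.
--     def gcd(a, b):
--         while b:
--             a, b = b, a % b
--         return a
--
--     def direction(p, q):
--         dx, dy = q[0] - p[0], q[1] - p[1]
--         if dx == 0 and dy == 0:
--             return None
--         g = gcd(abs(dx), abs(dy))
--         return (dx // g, dy // g)
--
--     dirs = [direction(p, q) for p, q in zip(path, path[1:])]
--     return [q for q, din, dout in zip(path[1:], dirs, dirs[1:])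
--             if din is not None and dout is not None and din != dout]
-- ===== Notes on version B (the rewrite author's own statement) =====
-- stated objective: alternative
-- what changed: B replaces A's per-point cross/dot test with a direction-classification algorithm: each edge is mapped to its gcd-reduced direction vector (None for a zero edge), and a point is emitted exactly when both incident edges have a direction class and the classes differ.
import Mathlib
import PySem

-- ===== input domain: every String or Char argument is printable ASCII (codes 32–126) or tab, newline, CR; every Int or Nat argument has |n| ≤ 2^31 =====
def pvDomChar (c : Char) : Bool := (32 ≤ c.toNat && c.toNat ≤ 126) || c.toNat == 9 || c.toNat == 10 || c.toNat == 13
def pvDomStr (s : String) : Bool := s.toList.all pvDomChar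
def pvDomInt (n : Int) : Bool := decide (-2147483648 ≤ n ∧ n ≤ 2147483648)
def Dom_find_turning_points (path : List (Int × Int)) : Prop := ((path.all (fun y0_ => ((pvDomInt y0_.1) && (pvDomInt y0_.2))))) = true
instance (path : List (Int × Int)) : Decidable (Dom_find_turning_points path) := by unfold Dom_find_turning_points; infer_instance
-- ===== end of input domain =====

-- B replaces A's per-point cross/dot test by a different algorithm: gcd-reduced direction classes per edge, emitting points where the class changes.


-- ===== PORT A =====
def find_turning_points (path : List (Int × Int)) : List (Int × Int) :=
  (PySem.List.pyRange 1 (PySem.List.len path - 1) 1).foldl (fun turning_points i =>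
    let current := PySem.List.pyGetD path i (0, 0)
    let previous := PySem.List.pyGetD path (i - 1) (0, 0)
    let next := PySem.List.pyGetD path (i + 1) (0, 0)
    if (current.1 - previous.1) * (next.2 - current.2) ≠ (current.2 - previous.2) * (next.1 - current.1) ∨
       (current.1 - previous.1) * (next.1 - current.1) + (current.2 - previous.2) * (next.2 - current.2) < 0
    then turning_points ++ [current] else turning_points) []

-- ===== PORT B =====
-- Euclid's gcd, as written in Source B ('while b: a, b = b, a % b')
def pvGcd (a b : Nat) : Nat :=
  if b = 0 then a else pvGcd b (a % b)
termination_by b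
decreasing_by exact Nat.mod_lt _ (Nat.pos_of_ne_zero (by assumption))

-- direction class of the edge p -> q: none for a zero edge, else the gcd-reduced vector
def pvDirection (p q : Int × Int) : Option (Int × Int) :=
  let dx := q.1 - p.1
  let dy := q.2 - p.2
  if dx = 0 ∧ dy = 0 then none
  else
    let g : Int := (pvGcd dx.natAbs dy.natAbs : Nat)
    some (PySem.Int.floordiv dx g, PySem.Int.floordiv dy g)

def find_turning_points_alt (path : List (Int × Int)) : List (Int × Int) :=
  let dirs := List.zipWith (fun p q => pvDirection p q) path (path.drop 1)
  (List.zip (path.drop 1) (List.zip dirs (dirs.drop 1))).filterMap (fun t =>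
    if t.2.1 ≠ none ∧ t.2.2 ≠ none ∧ t.2.1 ≠ t.2.2 then some t.1 else none)

-- ===== PRECONDITION & SPEC =====
def Spec_find_turning_points (path : List (Int × Int)) (out : List (Int × Int)) : Prop := out = find_turning_points_alt path
instance (path : List (Int × Int)) (out : List (Int × Int)) : Decidable (Spec_find_turning_points path out) := by unfold Spec_find_turning_points; infer_instance

-- ===== CLAIM (what is proved, stated in full; the proofs are below) =====
def Claim_equal_find_turning_points : Prop := ∀ (path : List (Int × Int)), Dom_find_turning_points path → Spec_find_turning_points path (find_turning_points path)

-- ===== LEMMAS AND PROOFS =====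

-- windows of three consecutive points (prev, cur, next)
def pvWin : List (Int × Int) → List ((Int × Int) × (Int × Int) × (Int × Int))
  | a :: b :: c :: rest => (a, b, c) :: pvWin (b :: c :: rest)
  | _ => []

-- the triple A's loop reads at index 1+k (prev, cur, next), as getD over Nat indices
def pvTripA (path : List (Int × Int)) (k : Nat) : (Int × Int) × (Int × Int) × (Int × Int) :=
  (path.getD k (0, 0), path.getD (k + 1) (0, 0), path.getD (k + 2) (0, 0))

-- turning condition in A's phrasing, on a (prev, cur, next) window (reducible, so the
-- Decidable instance is found by unfolding; no instance declaration needed)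
abbrev pvCondA (t : (Int × Int) × (Int × Int) × (Int × Int)) : Prop :=
  (t.2.1.1 - t.1.1) * (t.2.2.2 - t.2.1.2) ≠ (t.2.1.2 - t.1.2) * (t.2.2.1 - t.2.1.1) ∨
  (t.2.1.1 - t.1.1) * (t.2.2.1 - t.2.1.1) + (t.2.1.2 - t.1.2) * (t.2.2.2 - t.2.1.2) < 0

-- (prev, cur, next) window ↦ B's (point, (dir_in, dir_out)) triple
def pvConvB (t : (Int × Int) × (Int × Int) × (Int × Int)) :
    (Int × Int) × Option (Int × Int) × Option (Int × Int) :=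
  (t.2.1, pvDirection t.1 t.2.1, pvDirection t.2.1 t.2.2)

theorem pvWin_eq_map_range : ∀ (a b : Int × Int) (rest : List (Int × Int)),
    (List.range rest.length).map (pvTripA (a :: b :: rest)) = pvWin (a :: b :: rest) := by
  intro a b rest
  induction rest generalizing a b with
  | nil => rfl
  | cons c r ih =>
    have h := ih b c
    rw [List.length_cons, List.range_succ_eq_map, List.map_cons, List.map_map]
    refine congrArg₂ List.cons rfl ?_
    rw [← h]
    exact List.map_congr_left (fun k _ => by simp [pvTripA, Nat.succ_eq_add_one])

-- B's zipped triple list is the window list through pvConvB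
theorem pvZipB_eq_win_map : ∀ (path : List (Int × Int)),
    (List.zip (path.drop 1)
      (List.zip (List.zipWith (fun p q => pvDirection p q) path (path.drop 1))
        ((List.zipWith (fun p q => pvDirection p q) path (path.drop 1)).drop 1))) =
    (pvWin path).map pvConvB := by
  intro path
  match path with
  | [] => rfl
  | [a] => rfl
  | [a, b] => rfl
  | a :: b :: c :: rest =>
    have ih := pvZipB_eq_win_map (b :: c :: rest)
    simp only [List.drop_one, List.zipWith_cons_cons, List.tail_cons, List.zip_cons_cons,
      pvWin, List.map_cons, pvConvB] at ih ⊢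
    exact congrArg (List.cons _) ih

-- A's loop, rewritten to filter+map over the window list
theorem pvA_eq (path : List (Int × Int)) :
    find_turning_points path = ((pvWin path).filter (fun t => decide (pvCondA t))).map (fun t => t.2.1) := by
  unfold find_turning_points
  change (PySem.List.pyRange 1 (PySem.List.len path - 1) 1).foldl (fun acc i =>
      if pvCondA (PySem.List.pyGetD path (i - 1) (0, 0), PySem.List.pyGetD path i (0, 0),
          PySem.List.pyGetD path (i + 1) (0, 0))
      then acc ++ [PySem.List.pyGetD path i (0, 0)] else acc) [] = _
  rw [PySem.List.foldl_append_ite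
    (fun i => pvCondA (PySem.List.pyGetD path (i - 1) (0, 0), PySem.List.pyGetD path i (0, 0),
      PySem.List.pyGetD path (i + 1) (0, 0)))
    (fun i => PySem.List.pyGetD path i (0, 0))]
  simp only [List.nil_append]
  match path with
  | [] => rfl
  | [a] => rfl
  | a :: b :: rest =>
    have hlen : (PySem.List.len (a :: b :: rest) - 1 - 1).toNat = rest.length := by
      simp [PySem.List.len]
    rw [PySem.List.pyRange_one, hlen, List.filter_map, List.map_map,
      ← pvWin_eq_map_range a b rest, List.filter_map, List.map_map]
    congr 1
    · funext k
      have hb : (1 : Int) + (k : Int) = ((k + 1 : Nat) : Int) := by push_cast; omega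
      simp only [Function.comp, hb, PySem.List.pyGetD_natCast, pvTripA]
    · apply List.filter_congr
      intro k _
      have hb : (1 : Int) + (k : Int) = ((k + 1 : Nat) : Int) := by push_cast; omega
      have hd : ((k + 1 : Nat) : Int) - 1 = ((k : Nat) : Int) := by push_cast; omega
      have he : ((k + 1 : Nat) : Int) + 1 = ((k + 2 : Nat) : Int) := by push_cast; omega
      simp only [Function.comp, hb, hd, he, PySem.List.pyGetD_natCast, pvTripA]
      rfl

-- Euclid's loop computes Nat.gcd
theorem pvGcd_eq_gcd (a b : Nat) : pvGcd a b = Nat.gcd a b := by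
  induction b using Nat.strong_induction_on generalizing a with
  | _ b ih =>
    rw [pvGcd]
    by_cases hb : b = 0
    · simp [hb]
    · rw [if_neg hb, ih (a % b) (Nat.mod_lt _ (Nat.pos_of_ne_zero hb))]
      rw [Nat.gcd_comm a b, Nat.gcd_rec b a]
      exact (Nat.gcd_comm _ _).symm

-- two ints with equal absolute value and nonnegative product are equal
theorem pvAbsEq (x y : Int) (h1 : x.natAbs = y.natAbs) (h2 : 0 ≤ x * y) : x = y := by
  rcases Int.natAbs_eq x with hx | hx <;> rcases Int.natAbs_eq y with hy | hy <;>
    rw [h1] at hx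
  · exact hx.trans hy.symm
  · have : (y.natAbs : Int) = 0 := by nlinarith [hx ▸ hy ▸ h2]
    rw [hx, hy, this]; simp
  · have : (y.natAbs : Int) = 0 := by nlinarith [hx ▸ hy ▸ h2]
    rw [hx, hy, this]; simp
  · exact hx.trans hy.symm

-- core: for nonzero vectors, equal gcd-reduced forms ⟺ parallel with nonnegative dot product
theorem pvDirCore (a1 a2 b1 b2 : Int) (ha : ¬(a1 = 0 ∧ a2 = 0)) (hb : ¬(b1 = 0 ∧ b2 = 0)) :
    (a1 / (Int.gcd a1 a2 : Int) = b1 / (Int.gcd b1 b2 : Int) ∧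
     a2 / (Int.gcd a1 a2 : Int) = b2 / (Int.gcd b1 b2 : Int)) ↔
    (a1 * b2 = a2 * b1 ∧ 0 ≤ a1 * b1 + a2 * b2) := by
  set g : Int := (Int.gcd a1 a2 : Int) with hg
  set h : Int := (Int.gcd b1 b2 : Int) with hh
  have hg0 : 0 < g := by
    rw [hg]
    exact_mod_cast Nat.pos_of_ne_zero (by simp only [ne_eq, Int.gcd_eq_zero_iff]; tauto)
  have hh0 : 0 < h := by
    rw [hh]
    exact_mod_cast Nat.pos_of_ne_zero (by simp only [ne_eq, Int.gcd_eq_zero_iff]; tauto)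
  have hga1 : g ∣ a1 := by rw [hg]; exact Int.gcd_dvd_left a1 a2
  have hga2 : g ∣ a2 := by rw [hg]; exact Int.gcd_dvd_right a1 a2
  have hhb1 : h ∣ b1 := by rw [hh]; exact Int.gcd_dvd_left b1 b2
  have hhb2 : h ∣ b2 := by rw [hh]; exact Int.gcd_dvd_right b1 b2
  have e1 : g * (a1 / g) = a1 := Int.mul_ediv_cancel' hga1
  have e2 : g * (a2 / g) = a2 := Int.mul_ediv_cancel' hga2
  have e3 : h * (b1 / h) = b1 := Int.mul_ediv_cancel' hhb1
  have e4 : h * (b2 / h) = b2 := Int.mul_ediv_cancel' hhb2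
  constructor
  · rintro ⟨q1, q2⟩
    have m1 : h * a1 = g * b1 := by rw [← e1, ← e3, q1]; ring
    have m2 : h * a2 = g * b2 := by rw [← e2, ← e4, q2]; ring
    constructor
    · have hz : h * (a1 * b2 - a2 * b1) = 0 := by linear_combination b2 * m1 - b1 * m2
      rcases mul_eq_zero.mp hz with h0 | h0
      · exact absurd h0 (by omega)
      · linarith
    · have hq : h * (a1 * b1 + a2 * b2) = g * (b1 * b1 + b2 * b2) := by
        linear_combination b1 * m1 + b2 * m2
      have hr : 0 ≤ g * (b1 * b1 + b2 * b2) :=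
        mul_nonneg hg0.le (add_nonneg (mul_self_nonneg b1) (mul_self_nonneg b2))
      by_contra hcon
      have := mul_neg_of_pos_of_neg hh0 (not_le.mp hcon)
      linarith [hq, hr]
  · rintro ⟨hc, hd⟩
    have hS : 0 < a1 * a1 + a2 * a2 := by
      rcases not_and_or.mp ha with h0 | h0
      · linarith [mul_self_pos.mpr h0, mul_self_nonneg a2]
      · linarith [mul_self_pos.mpr h0, mul_self_nonneg a1]
    have id1 : a1 * (a1 * b1 + a2 * b2) = (a1 * a1 + a2 * a2) * b1 := by
      linear_combination a2 * hc
    have id2 : a2 * (a1 * b1 + a2 * b2) = (a1 * a1 + a2 * a2) * b2 := by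
      linear_combination (-a1) * hc
    have hdpos : 0 < a1 * b1 + a2 * b2 := by
      rcases lt_or_eq_of_le hd with h' | h'
      · exact h'
      · exfalso
        rw [← h'] at id1 id2
        have hb1 : b1 = 0 := by
          rcases mul_eq_zero.mp (show (a1 * a1 + a2 * a2) * b1 = 0 by linarith) with hX | hX
          · exact absurd hX (ne_of_gt hS)
          · exact hX
        have hb2 : b2 = 0 := by
          rcases mul_eq_zero.mp (show (a1 * a1 + a2 * a2) * b2 = 0 by linarith) with hX | hX
          · exact absurd hX (ne_of_gt hS)
          · exact hX
        exact hb ⟨hb1, hb2⟩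
    have k1 : a1 * b1 * (a1 * b1 + a2 * b2) = (a1 * a1 + a2 * a2) * (b1 * b1) := by
      linear_combination (b1 * a2) * hc
    have k2 : a2 * b2 * (a1 * b1 + a2 * b2) = (a1 * a1 + a2 * a2) * (b2 * b2) := by
      linear_combination (-(b2 * a1)) * hc
    have hsg1 : 0 ≤ a1 * b1 := by
      by_contra hneg
      have h1 : a1 * b1 * (a1 * b1 + a2 * b2) < 0 := mul_neg_of_neg_of_pos (not_le.mp hneg) hdpos
      have h2 : 0 ≤ (a1 * a1 + a2 * a2) * (b1 * b1) := mul_nonneg hS.le (mul_self_nonneg b1)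
      linarith [k1]
    have hsg2 : 0 ≤ a2 * b2 := by
      by_contra hneg
      have h1 : a2 * b2 * (a1 * b1 + a2 * b2) < 0 := mul_neg_of_neg_of_pos (not_le.mp hneg) hdpos
      have h2 : 0 ≤ (a1 * a1 + a2 * a2) * (b2 * b2) := mul_nonneg hS.le (mul_self_nonneg b2)
      linarith [k2]
    have habs1 : Int.gcd a1 a2 * b1.natAbs = Int.gcd b1 b2 * a1.natAbs := by
      have l1 : Int.gcd (a1 * b1) (a2 * b1) = Int.gcd a1 a2 * b1.natAbs := Int.gcd_mul_right a1 b1 a2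
      have l2 : Int.gcd (b1 * a1) (b2 * a1) = Int.gcd b1 b2 * a1.natAbs := Int.gcd_mul_right b1 a1 b2
      rw [← l1, ← l2, mul_comm b1 a1, mul_comm b2 a1, ← hc]
    have habs2 : Int.gcd a1 a2 * b2.natAbs = Int.gcd b1 b2 * a2.natAbs := by
      have l1 : Int.gcd (a1 * b2) (a2 * b2) = Int.gcd a1 a2 * b2.natAbs := Int.gcd_mul_right a1 b2 a2
      have l2 : Int.gcd (b1 * a2) (b2 * a2) = Int.gcd b1 b2 * a2.natAbs := Int.gcd_mul_right b1 a2 b2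
      rw [← l1, ← l2, mul_comm b1 a2, mul_comm b2 a2, hc]
    have m1 : h * a1 = g * b1 := by
      apply pvAbsEq _ _ ?_ ?_
      · rw [Int.natAbs_mul, Int.natAbs_mul, hg, hh, Int.natAbs_natCast, Int.natAbs_natCast]
        exact habs1.symm
      · have := mul_nonneg (mul_nonneg hg0.le hh0.le) hsg1
        linarith [this]
    have m2 : h * a2 = g * b2 := by
      apply pvAbsEq _ _ ?_ ?_
      · rw [Int.natAbs_mul, Int.natAbs_mul, hg, hh, Int.natAbs_natCast, Int.natAbs_natCast]
        exact habs2.symm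
      · have := mul_nonneg (mul_nonneg hg0.le hh0.le) hsg2
        linarith [this]
    have hgh : g * h ≠ 0 := (mul_pos hg0 hh0).ne'
    constructor
    · apply mul_left_cancel₀ hgh
      calc g * h * (a1 / g) = h * (g * (a1 / g)) := by ring
        _ = h * a1 := by rw [e1]
        _ = g * b1 := m1
        _ = g * (h * (b1 / h)) := by rw [e3]
        _ = g * h * (b1 / h) := by ring
    · apply mul_left_cancel₀ hgh
      calc g * h * (a2 / g) = h * (g * (a2 / g)) := by ring
        _ = h * a2 := by rw [e2]
        _ = g * b2 := m2
        _ = g * (h * (b2 / h)) := by rw [e4]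
        _ = g * h * (b2 / h) := by ring

-- pvDirection in closed form over ediv and Int.gcd
theorem pvDirection_eq (p q : Int × Int) :
    pvDirection p q =
      if (q.1 - p.1) = 0 ∧ (q.2 - p.2) = 0 then none
      else some ((q.1 - p.1) / (Int.gcd (q.1 - p.1) (q.2 - p.2) : Int),
                 (q.2 - p.2) / (Int.gcd (q.1 - p.1) (q.2 - p.2) : Int)) := by
  unfold pvDirection
  by_cases h : (q.1 - p.1) = 0 ∧ (q.2 - p.2) = 0
  · simp [h]
  · rw [if_neg h, if_neg h]
    have hg0 : 0 < ((pvGcd (q.1 - p.1).natAbs (q.2 - p.2).natAbs : Nat) : Int) := by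
      rw [pvGcd_eq_gcd]
      have : Nat.gcd (q.1 - p.1).natAbs (q.2 - p.2).natAbs ≠ 0 := by
        simp only [ne_eq, Nat.gcd_eq_zero_iff, Int.natAbs_eq_zero]; tauto
      exact_mod_cast Nat.pos_of_ne_zero this
    change some (PySem.Int.floordiv (q.1 - p.1) ((pvGcd (q.1 - p.1).natAbs (q.2 - p.2).natAbs : Nat) : Int),
                 PySem.Int.floordiv (q.2 - p.2) ((pvGcd (q.1 - p.1).natAbs (q.2 - p.2).natAbs : Nat) : Int)) = _
    rw [PySem.Int.floordiv_eq_ediv_of_pos hg0, PySem.Int.floordiv_eq_ediv_of_pos hg0,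
      pvGcd_eq_gcd]
    rfl

-- per-window: B's direction-class test agrees with A's cross/dot test
theorem pvCond_iff (t : (Int × Int) × (Int × Int) × (Int × Int)) :
    ((pvConvB t).2.1 ≠ none ∧ (pvConvB t).2.2 ≠ none ∧ (pvConvB t).2.1 ≠ (pvConvB t).2.2) ↔
    pvCondA t := by
  obtain ⟨p, q, r⟩ := t
  simp only [pvConvB, pvCondA, pvDirection_eq]
  by_cases ha : (q.1 - p.1) = 0 ∧ (q.2 - p.2) = 0
  · simp [ha.1, ha.2]
  · by_cases hb : (r.1 - q.1) = 0 ∧ (r.2 - q.2) = 0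
    · simp [ha, hb.1, hb.2]
    · rw [if_neg ha, if_neg hb]
      have core := pvDirCore (q.1 - p.1) (q.2 - p.2) (r.1 - q.1) (r.2 - q.2) ha hb
      constructor
      · rintro ⟨-, -, hne⟩
        by_contra hA
        rw [not_or, not_ne_iff, not_lt] at hA
        have hpair := core.mpr ⟨hA.1, hA.2⟩
        exact hne (by rw [hpair.1, hpair.2])
      · intro hA
        refine ⟨Option.some_ne_none _, Option.some_ne_none _, fun heq => ?_⟩
        have hpq := Option.some.inj heq
        rw [Prod.mk.injEq] at hpq
        have hcd := core.mp ⟨hpq.1, hpq.2⟩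
        rcases hA with h1 | h1
        · exact h1 hcd.1
        · linarith [hcd.2]

-- filterMap with an if-some-else-none body is filter-then-map
theorem pvFilterMap_if {α β : Type} (p : α → Prop) [DecidablePred p] (f : α → β) :
    ∀ (l : List α), l.filterMap (fun x => if p x then some (f x) else none) =
      (l.filter (fun x => decide (p x))).map f := by
  intro l
  induction l with
  | nil => rfl
  | cons x xs ih =>
    rw [List.filterMap_cons, List.filter_cons]
    by_cases hx : p x
    · simp [hx, ih]
    · simp [hx, ih]

-- B's program, rewritten to the same filter+map over the window list
theorem pvB_eq (path : List (Int × Int)) :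
    find_turning_points_alt path = ((pvWin path).filter (fun t => decide (pvCondA t))).map (fun t => t.2.1) := by
  unfold find_turning_points_alt
  change (List.zip (path.drop 1)
      (List.zip (List.zipWith (fun p q => pvDirection p q) path (path.drop 1))
        ((List.zipWith (fun p q => pvDirection p q) path (path.drop 1)).drop 1))).filterMap
      (fun t => if t.2.1 ≠ none ∧ t.2.2 ≠ none ∧ t.2.1 ≠ t.2.2 then some t.1 else none) = _
  rw [pvZipB_eq_win_map path]
  rw [pvFilterMap_if (fun t : (Int × Int) × Option (Int × Int) × Option (Int × Int) =>
        t.2.1 ≠ none ∧ t.2.2 ≠ none ∧ t.2.1 ≠ t.2.2) (fun t => t.1)]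
  rw [List.filter_map, List.map_map]
  congr 1
  · apply List.filter_congr
    intro t _
    simp only [Function.comp]
    rw [decide_eq_decide]
    exact pvCond_iff t

-- ===== VERDICT (by name: the statement is the Claim_ definition above) =====
theorem find_turning_points_spec : Claim_equal_find_turning_points := by
  intro path _
  unfold Spec_find_turning_points
  rw [pvA_eq, pvB_eq]
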